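-- pv_equiv track=rewrite | github.com/PatrykCiwinski/wsb_dzien4 | zadanie_zbiory.py | podziel_zbiory
-- ===== SOURCE A (Python) =====
-- def podziel_zbiory(zbior):
--     damski=set()
--     meski=set()
--     for element in zbior:
--         if element%2 ==0:
--             damski.add(element)
--         else:
--             meski.add(element)
--     return damski, meski
-- ===== SOURCE B (Python) =====
-- def podziel_zbiory(zbior):
--     damski = {e for e in zbior if e % 2 == 0}
--     meski = set(zbior) - damski
--     return damski, meski
-- ===== Notes on version B (the rewrite author's own statement) =====
-- stated objective: idiomatic
-- what changed: Replaces the element-by-element routing loop with a parity set comprehension for the evens and a set-difference over the whole input for the odds.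
import Mathlib
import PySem

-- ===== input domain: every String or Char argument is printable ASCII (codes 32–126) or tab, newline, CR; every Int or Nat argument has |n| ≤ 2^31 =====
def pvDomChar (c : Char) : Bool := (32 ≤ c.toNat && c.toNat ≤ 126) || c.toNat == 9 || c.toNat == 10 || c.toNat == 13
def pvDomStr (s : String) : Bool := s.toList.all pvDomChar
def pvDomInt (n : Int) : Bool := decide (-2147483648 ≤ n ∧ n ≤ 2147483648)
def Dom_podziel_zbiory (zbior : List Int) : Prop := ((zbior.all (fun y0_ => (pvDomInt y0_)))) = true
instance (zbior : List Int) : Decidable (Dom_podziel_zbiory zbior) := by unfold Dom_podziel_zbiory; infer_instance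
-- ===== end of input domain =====

-- B replaces A's route-each-element loop by a parity set comprehension for the evens
-- plus a set-difference over the input for the odds (objective: idiomatic; same cost).


-- ===== PORT A =====
-- for element in zbior: route element into damski/meski by parity
def podziel_zbiory (zbior : List Int) : List Int × List Int :=
  zbior.foldl
    (fun (st : PySem.Set Int × PySem.Set Int) element =>
      if PySem.Int.mod element 2 = 0 then (PySem.Set.add st.1 element, st.2)
      else (st.1, PySem.Set.add st.2 element))
    (PySem.Set.empty, PySem.Set.empty)

-- ===== PORT B =====
-- damski = {e for e in zbior if e % 2 == 0}; meski = set(zbior) - damski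
def podziel_zbiory_alt (zbior : List Int) : List Int × List Int :=
  let damski : PySem.Set Int :=
    PySem.Set.ofList (zbior.filter (fun e => PySem.Int.mod e 2 = 0))
  let meski : PySem.Set Int := PySem.Set.diff (PySem.Set.ofList zbior) damski
  (damski, meski)

-- ===== PRECONDITION & SPEC =====
def Spec_podziel_zbiory (zbior : List Int) (out : List Int × List Int) : Prop := out = podziel_zbiory_alt zbior
instance (zbior : List Int) (out : List Int × List Int) : Decidable (Spec_podziel_zbiory zbior out) := by unfold Spec_podziel_zbiory; infer_instance

-- ===== CLAIM (what is proved, stated in full; the proofs are below) =====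
def Claim_equal_podziel_zbiory : Prop := ∀ (zbior : List Int), Dom_podziel_zbiory zbior → Spec_podziel_zbiory zbior (podziel_zbiory zbior)

-- ===== LEMMAS AND PROOFS =====

-- A's loop, from arbitrary accumulators: adds the even elements to the first set
-- and the odd elements to the second, in order.
theorem podziel_loop (zbior : List Int) (d m : PySem.Set Int) :
    zbior.foldl
      (fun (st : PySem.Set Int × PySem.Set Int) element =>
        if PySem.Int.mod element 2 = 0 then (PySem.Set.add st.1 element, st.2)
        else (st.1, PySem.Set.add st.2 element)) (d, m)
    = (PySem.Set.update d (zbior.filter (fun e => PySem.Int.mod e 2 = 0)),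
       PySem.Set.update m (zbior.filter (fun e => !decide (PySem.Int.mod e 2 = 0)))) := by
  induction zbior generalizing d m with
  | nil => simp [PySem.Set.update]
  | cons x xs ih =>
      rw [List.foldl_cons]
      by_cases hx : PySem.Int.mod x 2 = 0
      · rw [if_pos hx, ih]
        simp only [List.filter_cons, decide_eq_true hx, Bool.not_true, if_true,
                   Bool.false_eq_true, if_false, PySem.Set.update_cons]
      · rw [if_neg hx, ih]
        simp only [List.filter_cons, decide_eq_false hx, Bool.not_false, if_true,
                   Bool.false_eq_true, if_false, PySem.Set.update_cons]

-- set(xs) commutes with filtering by a pure predicate.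
theorem ofList_filter (p : Int → Bool) (xs : List Int) :
    PySem.Set.ofList (xs.filter p) = (PySem.Set.ofList xs).filter p := by
  induction xs with
  | nil => rfl
  | cons x xs ih =>
      by_cases hx : p x = true
      · simp [hx, PySem.Set.ofList_cons, ih, PySem.Set.discard, List.filter_filter,
              Bool.and_comm]
      · simp only [Bool.not_eq_true] at hx
        simp [hx, PySem.Set.ofList_cons, ih, PySem.Set.discard, List.filter_filter]
        congr 1
        funext y
        by_cases hy : y = x <;> simp [hy, hx]

-- set(zbior) - {evens of zbior} = {odds of zbior}.
theorem diff_evens (zbior : List Int) :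
    PySem.Set.diff (PySem.Set.ofList zbior)
        (PySem.Set.ofList (zbior.filter (fun e => PySem.Int.mod e 2 = 0)))
      = PySem.Set.ofList (zbior.filter (fun e => !decide (PySem.Int.mod e 2 = 0))) := by
  rw [ofList_filter, ofList_filter]
  unfold PySem.Set.diff
  apply List.filter_congr
  intro y hy
  have hmem : y ∈ PySem.Set.ofList zbior := hy
  by_cases h : PySem.Int.mod y 2 = 0
  · simp only [PySem.Set.contains, List.contains_eq_mem, List.mem_filter,
               decide_eq_true h, Bool.not_true]
    simp [hmem]
  · simp only [PySem.Set.contains, List.contains_eq_mem, List.mem_filter,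
               decide_eq_false h, Bool.not_false]
    simp

-- ===== VERDICT (by name: the statement is the Claim_ definition above) =====
theorem podziel_zbiory_spec : Claim_equal_podziel_zbiory := by
  intro zbior _
  unfold Spec_podziel_zbiory podziel_zbiory podziel_zbiory_alt
  rw [podziel_loop]
  simp only [PySem.Set.empty, PySem.Set.update_nil_left]
  rw [diff_evens]
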